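-- pv_equiv track=rewrite | github.com/walkccc/LeetCode | solutions/2852. Sum of Remoteness of All Cells/2852.py | sumRemoteness
-- ===== SOURCE A (Python) =====
-- def sumRemoteness(grid: list[list[int]]) -> int:
--   dirs = ((0, 1), (1, 0), (0, -1), (-1, 0))
--   n = len(grid)
--   summ = sum(max(0, cell) for row in grid for cell in row)
--   ans = 0
--
--   def dfs(i: int, j: int) -> tuple[int, int]:
--     """
--     Returns the (count, componentSum) of the connected component that contains
--     (x, y).
--     """
--     if i < 0 or i == len(grid) or j < 0 or j == len(grid[0]):
--       return (0, 0)
--     if grid[i][j] == -1: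
--       return (0, 0)
--
--     count = 1
--     componentSum = grid[i][j]
--     grid[i][j] = -1  # Mark as visited.
--
--     for dx, dy in dirs:
--       x = i + dx
--       y = j + dy
--       nextCount, nextComponentSum = dfs(x, y)
--       count += nextCount
--       componentSum += nextComponentSum
--
--     return (count, componentSum)
--
--   for i in range(n):
--     for j in range(n):
--       if grid[i][j] > 0:
--         count, componentSum = dfs(i, j)
--         ans += (summ - componentSum) * count
--
--   return ans
-- ===== SOURCE B (Python) =====
-- def sumRemoteness(grid: list[list[int]]) -> int:
--   n = len(grid)
--   summ = sum(sum(max(0, v) for v in row) for row in grid)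
--   ans = 0
--   for i in range(n):
--     for j in range(n):
--       if grid[i][j] > 0:
--         count = 0
--         componentSum = 0
--         stack = [(i, j)]
--         while stack:
--           x, y = stack.pop()
--           if 0 <= x < n and 0 <= y < n and grid[x][y] != -1:
--             count += 1
--             componentSum += grid[x][y]
--             grid[x][y] = -1  # Mark as visited.
--             stack.extend(((x - 1, y), (x, y - 1), (x + 1, y), (x, y + 1)))
--         ans += (summ - componentSum) * count
--   return ans
-- ===== Notes on version B (the rewrite author's own statement) =====
-- stated objective: alternative
-- what changed: The recursive 4-way DFS is replaced by an iterative flood fill with an explicit stack (pop a cell, skip if out of range or already marked, otherwise count it, mark it -1 and push its four neighbours); the total positive sum is accumulated per row instead of over a flat generator.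
-- outside the precondition, e.g. on sumRemoteness([[1, 2]]): A returns 0, B returns 2
import Mathlib
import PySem

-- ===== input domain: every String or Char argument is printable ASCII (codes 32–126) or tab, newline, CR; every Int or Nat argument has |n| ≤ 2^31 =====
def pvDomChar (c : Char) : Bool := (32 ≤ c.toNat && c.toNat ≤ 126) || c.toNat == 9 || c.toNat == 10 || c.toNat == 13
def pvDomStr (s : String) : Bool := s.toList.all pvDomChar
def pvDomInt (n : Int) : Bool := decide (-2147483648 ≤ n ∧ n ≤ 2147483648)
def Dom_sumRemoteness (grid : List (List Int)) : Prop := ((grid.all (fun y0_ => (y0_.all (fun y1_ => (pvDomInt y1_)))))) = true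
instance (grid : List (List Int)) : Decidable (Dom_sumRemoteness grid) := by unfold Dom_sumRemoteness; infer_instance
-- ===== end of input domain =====

-- B replaces A's recursive DFS by an iterative explicit-stack flood fill (mark on pop) and sums the
-- positive cells row by row; equal cost, no recursion. Both A and B mutate `grid` in place in the
-- same way (every visited cell is set to -1); the theorems below are about the return value.

-- grid cell access grid[i][j] (used only at indices both Pythons have bounds-checked)
def pvGget (g : List (List Int)) (i j : Int) : Int := (g.getD i.toNat []).getD j.toNat 0

-- grid cell update grid[i][j] = v
def pvGset (g : List (List Int)) (i j : Int) (v : Int) : List (List Int) :=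
  g.set i.toNat ((g.getD i.toNat []).set j.toNat v)

-- number of cells still ≠ -1 (termination measure for the flood fills; not part of either Python)
def pvU (g : List (List Int)) : Nat := (g.map (fun r => r.countP (fun v => v != -1))).sum

lemma pvCountP_set (r : List Int) (b : Nat) (hb : b < r.length) (hv : r.getD b 0 ≠ -1) :
    (r.set b (-1)).countP (fun v => v != -1) + 1 = r.countP (fun v => v != -1) := by
  induction r generalizing b with
  | nil => simp at hb
  | cons a t ih =>
    cases b with
    | zero =>
      simp only [List.getD, List.getElem?_cons_zero, Option.getD_some] at hv
      simp [List.countP_cons, hv]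
    | succ b =>
      simp only [List.length_cons, Nat.succ_lt_succ_iff] at hb
      simp only [List.getD, List.getElem?_cons_succ] at hv
      simp only [List.set_cons_succ, List.countP_cons]
      have := ih b hb hv
      omega

lemma pvU_set (g : List (List Int)) (a b : Nat) (ha : a < g.length)
    (hb : b < (g.getD a []).length) (hv : (g.getD a []).getD b 0 ≠ -1) :
    pvU (g.set a ((g.getD a []).set b (-1))) + 1 = pvU g := by
  induction g generalizing a with
  | nil => simp at ha
  | cons r t ih =>
    cases a with
    | zero =>
      simp only [List.getD, List.getElem?_cons_zero, Option.getD_some] at hb hv ⊢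
      simp only [List.set_cons_zero, pvU, List.map_cons, List.sum_cons]
      have := pvCountP_set r b hb hv
      omega
    | succ a =>
      simp only [List.length_cons, Nat.succ_lt_succ_iff] at ha
      simp only [List.getD, List.getElem?_cons_succ] at hb hv ⊢
      simp only [List.set_cons_succ, pvU, List.map_cons, List.sum_cons]
      have := ih a ha hb hv
      simp only [pvU, List.getD] at this
      omega

lemma pvU_mark (g : List (List Int)) (x y : Int) (hx : 0 ≤ x) (hx2 : x.toNat < g.length)
    (hy : 0 ≤ y) (hrow : y.toNat < (g.getD x.toNat []).length) (hv : pvGget g x y ≠ -1) :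
    pvU (pvGset g x y (-1)) + 1 = pvU g := by
  exact pvU_set g x.toNat y.toNat hx2 hrow hv

-- ===== PORT A =====

def pvDirs : List (Int × Int) := [(0, 1), (1, 0), (0, -1), (-1, 0)]

-- A's recursive dfs; the fuel argument is only a totality device (pvU g + 1 always suffices)
def pvDfsF (fuel : Nat) (g : List (List Int)) (i j : Int) : List (List Int) × Int × Int :=
  match fuel with
  | 0 => (g, 0, 0)
  | f + 1 =>
    if i < 0 ∨ i = (g.length : Int) ∨ j < 0 ∨ j = ((g.headD []).length : Int) then (g, 0, 0)
    else if pvGget g i j = -1 then (g, 0, 0)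
    else
      pvDirs.foldl
        (fun st d =>
          let r := pvDfsF f st.1 (i + d.1) (j + d.2)
          (r.1, st.2.1 + r.2.1, st.2.2 + r.2.2))
        (pvGset g i j (-1), 1, pvGget g i j)
termination_by fuel

def pvDfsA (g : List (List Int)) (i j : Int) : List (List Int) × Int × Int :=
  pvDfsF (pvU g + 1) g i j

def sumRemoteness (grid : List (List Int)) : Int :=
  let n := grid.length
  let summ := (grid.flatMap (fun row => row.map (fun cell => max 0 cell))).sum
  ((List.range n).foldl
    (fun st i =>
      (List.range n).foldl
        (fun st j =>
          if pvGget st.1 (i : Int) (j : Int) > 0 then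
            let r := pvDfsA st.1 (i : Int) (j : Int)
            (r.1, st.2 + (summ - r.2.2) * r.2.1)
          else st)
        st)
    (grid, 0)).2

-- ===== PORT B =====

-- the stack loop of B: pop, skip if out of range or marked, else count, mark -1, push neighbours.
-- The conjunct 'y.toNat < (g.getD x.toNat []).length' is a totality guard: there Python raises
-- IndexError (only on ragged grids, which Pre_ excludes).
def pvLoopB (g : List (List Int)) (st : List (Int × Int)) (cnt s : Int) :
    List (List Int) × Int × Int :=
  match st with
  | [] => (g, cnt, s)
  | (x, y) :: rest =>
    if h : 0 ≤ x ∧ x < (g.length : Int) ∧ 0 ≤ y ∧ y < (g.length : Int) ∧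
        y.toNat < (g.getD x.toNat []).length ∧ pvGget g x y ≠ -1 then
      pvLoopB (pvGset g x y (-1)) ((x, y + 1) :: (x + 1, y) :: (x, y - 1) :: (x - 1, y) :: rest)
        (cnt + 1) (s + pvGget g x y)
    else pvLoopB g rest cnt s
termination_by 5 * pvU g + st.length
decreasing_by
  · have hm := pvU_mark g x y h.1 (by omega) h.2.2.1 h.2.2.2.2.1 h.2.2.2.2.2
    simp only [List.length_cons]
    omega
  · simp only [List.length_cons]
    omega

def sumRemoteness_alt (grid : List (List Int)) : Int :=
  let n := grid.length
  let summ := (grid.map (fun row => (row.map (fun v => max 0 v)).sum)).sum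
  ((List.range n).foldl
    (fun st i =>
      (List.range n).foldl
        (fun st j =>
          if pvGget st.1 (i : Int) (j : Int) > 0 then
            let r := pvLoopB st.1 [((i : Int), (j : Int))] 0 0
            (r.1, st.2 + (summ - r.2.2) * r.2.1)
          else st)
        st)
    (grid, 0)).2

-- ===== PRECONDITION & SPEC =====
-- Pre_ restricts to the problem's natural domain of square n×n grids: on ragged grids A usually
-- raises IndexError, and where it happens to return, its value depends on the accidental column
-- bound len(grid[0]) of its dfs, which disagrees with its seeding range.
def Pre_sumRemoteness (grid : List (List Int)) : Prop := ∀ r ∈ grid, r.length = grid.length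
instance (grid : List (List Int)) : Decidable (Pre_sumRemoteness grid) := by
  unfold Pre_sumRemoteness; infer_instance

def pvWitness_sumRemoteness : List (List Int) := [[1, 0], [0, 2]]

def Spec_sumRemoteness (grid : List (List Int)) (out : Int) : Prop := out = sumRemoteness_alt grid
instance (grid : List (List Int)) (out : Int) : Decidable (Spec_sumRemoteness grid out) := by
  unfold Spec_sumRemoteness; infer_instance

-- ===== CLAIM (what is proved, stated in full; the proofs are below) =====
def Claim_equal_sumRemoteness : Prop := ∀ (grid : List (List Int)), Dom_sumRemoteness grid →
  Pre_sumRemoteness grid → Spec_sumRemoteness grid (sumRemoteness grid)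

-- ===== LEMMAS AND PROOFS =====

-- all rows have the grid's length (same formula as Pre_)
def pvSquare (g : List (List Int)) : Prop := ∀ r ∈ g, r.length = g.length

lemma pvGset_length (g : List (List Int)) (x y v : Int) : (pvGset g x y v).length = g.length := by
  simp [pvGset]

lemma pvSquare_gset (g : List (List Int)) (x y v : Int) (h : pvSquare g) :
    pvSquare (pvGset g x y v) := by
  by_cases hx : x.toNat < g.length
  · intro r hr
    rw [pvGset_length]
    rcases List.mem_or_eq_of_mem_set hr with h1 | h1
    · exact h r h1
    · subst h1
      rw [List.length_set]
      have hm : g.getD x.toNat [] ∈ g := by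
        rw [List.getD_eq_getElem g [] hx]
        exact List.getElem_mem hx
      exact h _ hm
  · unfold pvGset
    rw [List.set_eq_of_length_le (Nat.le_of_not_lt hx)]
    exact h

lemma pvCols_eq (g : List (List Int)) (h : pvSquare g) (h0 : 0 < g.length) :
    ((g.headD []).length : Int) = (g.length : Int) := by
  cases g with
  | nil => simp at h0
  | cons r t =>
    have := h r (by simp)
    simp [this]

lemma pvU_ge1 (g : List (List Int)) (x y : Int) (hx : 0 ≤ x) (hx2 : x.toNat < g.length)
    (hy : 0 ≤ y) (hrow : y.toNat < (g.getD x.toNat []).length) (hv : pvGget g x y ≠ -1) :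
    1 ≤ pvU g := by
  have := pvU_mark g x y hx hx2 hy hrow hv; omega

lemma pvRow_len (g : List (List Int)) (a : Nat) (hsq : pvSquare g) (ha : a < g.length) :
    (g.getD a []).length = g.length := by
  have hm : g.getD a [] ∈ g := by
    rw [List.getD_eq_getElem g [] ha]
    exact List.getElem_mem ha
  exact hsq _ hm

lemma pvDfsF_succ (f : Nat) (g : List (List Int)) (i j : Int) :
    pvDfsF (f + 1) g i j =
      if i < 0 ∨ i = (g.length : Int) ∨ j < 0 ∨ j = ((g.headD []).length : Int) then (g, 0, 0)
      else if pvGget g i j = -1 then (g, 0, 0)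
      else
        pvDirs.foldl
          (fun st d =>
            let r := pvDfsF f st.1 (i + d.1) (j + d.2)
            (r.1, st.2.1 + r.2.1, st.2.2 + r.2.2))
          (pvGset g i j (-1), 1, pvGget g i j) := by
  rw [pvDfsF]

lemma pvChain (f : Nat) (n : Nat) (i j : Int)
    (hIH : ∀ (g : List (List Int)) (a b : Int), pvSquare g → pvU g < f → -1 ≤ a →
      a ≤ (g.length : Int) → -1 ≤ b → b ≤ (g.length : Int) →
      pvDfsF f g a b = pvDfsF (f + 1) g a b ∧ pvU (pvDfsF f g a b).1 ≤ pvU g ∧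
        pvSquare (pvDfsF f g a b).1 ∧ (pvDfsF f g a b).1.length = g.length) :
    ∀ (ds : List (Int × Int)) (g : List (List Int)) (c s : Int), pvSquare g → g.length = n →
    pvU g < f →
    (∀ d ∈ ds, -1 ≤ i + d.1 ∧ i + d.1 ≤ (n : Int) ∧ -1 ≤ j + d.2 ∧ j + d.2 ≤ (n : Int)) →
    (ds.foldl (fun st d => let r := pvDfsF f st.1 (i + d.1) (j + d.2);
        (r.1, st.2.1 + r.2.1, st.2.2 + r.2.2)) (g, c, s)
      = ds.foldl (fun st d => let r := pvDfsF (f + 1) st.1 (i + d.1) (j + d.2);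
        (r.1, st.2.1 + r.2.1, st.2.2 + r.2.2)) (g, c, s))
    ∧ pvU (ds.foldl (fun st d => let r := pvDfsF f st.1 (i + d.1) (j + d.2);
        (r.1, st.2.1 + r.2.1, st.2.2 + r.2.2)) (g, c, s)).1 ≤ pvU g
    ∧ pvSquare (ds.foldl (fun st d => let r := pvDfsF f st.1 (i + d.1) (j + d.2);
        (r.1, st.2.1 + r.2.1, st.2.2 + r.2.2)) (g, c, s)).1
    ∧ (ds.foldl (fun st d => let r := pvDfsF f st.1 (i + d.1) (j + d.2);
        (r.1, st.2.1 + r.2.1, st.2.2 + r.2.2)) (g, c, s)).1.length = n := by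
  intro ds
  induction ds with
  | nil => intro g c s hsq hlen hf _; exact ⟨rfl, le_refl _, hsq, hlen⟩
  | cons d ds ih =>
    intro g c s hsq hlen hf hds
    have hd := hds d (by simp)
    have hstep := hIH g (i + d.1) (j + d.2) hsq hf hd.1 (by omega) hd.2.2.1 (by omega)
    simp only [List.foldl_cons]
    rw [← hstep.1]
    have hU1 : pvU (pvDfsF f g (i + d.1) (j + d.2)).1 ≤ pvU g := hstep.2.1
    have hsq1 : pvSquare (pvDfsF f g (i + d.1) (j + d.2)).1 := hstep.2.2.1
    have hlen1 : (pvDfsF f g (i + d.1) (j + d.2)).1.length = n := by rw [hstep.2.2.2, hlen]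
    have := ih (pvDfsF f g (i + d.1) (j + d.2)).1 (c + (pvDfsF f g (i + d.1) (j + d.2)).2.1)
      (s + (pvDfsF f g (i + d.1) (j + d.2)).2.2) hsq1 hlen1 (by omega)
      (fun e he => hds e (by simp [he]))
    exact ⟨this.1, le_trans this.2.1 hU1, this.2.2.1, this.2.2.2⟩

-- fuel-irrelevance, measure decrease and shape preservation for A's dfs, by induction on fuel
lemma pvDfsF_step : ∀ (f : Nat) (g : List (List Int)) (i j : Int), pvSquare g → pvU g < f →
    -1 ≤ i → i ≤ (g.length : Int) → -1 ≤ j → j ≤ (g.length : Int) →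
    pvDfsF f g i j = pvDfsF (f + 1) g i j ∧ pvU (pvDfsF f g i j).1 ≤ pvU g ∧
      pvSquare (pvDfsF f g i j).1 ∧ (pvDfsF f g i j).1.length = g.length := by
  intro f
  induction f with
  | zero => intro g i j _ hf; omega
  | succ f ih =>
    intro g i j hsq hf hi1 hi2 hj1 hj2
    by_cases hg : i < 0 ∨ i = (g.length : Int) ∨ j < 0 ∨ j = ((g.headD []).length : Int)
    · rw [pvDfsF_succ, pvDfsF_succ, if_pos hg, if_pos hg]
      exact ⟨rfl, le_refl _, hsq, rfl⟩
    · by_cases hm : pvGget g i j = -1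
      · rw [pvDfsF_succ, pvDfsF_succ, if_neg hg, if_neg hg, if_pos hm, if_pos hm]
        exact ⟨rfl, le_refl _, hsq, rfl⟩
      · push_neg at hg
        have hi : 0 ≤ i ∧ i < (g.length : Int) := ⟨by omega, by omega⟩
        have h0 : 0 < g.length := by omega
        have hcols : ((g.headD []).length : Int) = (g.length : Int) := pvCols_eq g hsq h0
        have hj : 0 ≤ j ∧ j < (g.length : Int) := ⟨by omega, by omega⟩
        have hrow : j.toNat < (g.getD i.toNat []).length := by
          rw [pvRow_len g i.toNat hsq (by omega)]; omega
        have hmark := pvU_mark g i j hi.1 (by omega) hj.1 hrow hm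
        have hsq1 : pvSquare (pvGset g i j (-1)) := pvSquare_gset g i j (-1) hsq
        have hlen1 : (pvGset g i j (-1)).length = g.length := pvGset_length g i j (-1)
        have hch := pvChain f g.length i j ih pvDirs (pvGset g i j (-1)) 1 (pvGget g i j)
          hsq1 hlen1 (by omega)
          (by
            intro d hd
            simp only [pvDirs, List.mem_cons, List.not_mem_nil, or_false] at hd
            rcases hd with rfl | rfl | rfl | rfl <;> simp <;> omega)
        have hng : ¬(i < 0 ∨ i = (g.length : Int) ∨ j < 0 ∨ j = ((g.headD []).length : Int)) := by
          omega
        rw [pvDfsF_succ, pvDfsF_succ, if_neg hng, if_neg hng, if_neg hm, if_neg hm]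
        exact ⟨hch.1, le_trans hch.2.1 (by omega), hch.2.2.1, hch.2.2.2⟩

lemma pvDfsF_eq_dfsA (f : Nat) (g : List (List Int)) (i j : Int) (hsq : pvSquare g)
    (hf : pvU g < f) (hi1 : -1 ≤ i) (hi2 : i ≤ (g.length : Int)) (hj1 : -1 ≤ j)
    (hj2 : j ≤ (g.length : Int)) : pvDfsF f g i j = pvDfsA g i j := by
  have key : ∀ k, pvDfsF (pvU g + 1 + k) g i j = pvDfsF (pvU g + 1) g i j := by
    intro k
    induction k with
    | zero => rfl
    | succ k ih =>
      have hstep := (pvDfsF_step (pvU g + 1 + k) g i j hsq (by omega) hi1 hi2 hj1 hj2).1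
      rw [show pvU g + 1 + (k + 1) = (pvU g + 1 + k) + 1 from by omega, ← hstep, ih]
  have hf' : f = pvU g + 1 + (f - (pvU g + 1)) := by omega
  rw [pvDfsA, hf', key]

lemma pvDfsA_props (g : List (List Int)) (i j : Int) (hsq : pvSquare g) (hi1 : -1 ≤ i)
    (hi2 : i ≤ (g.length : Int)) (hj1 : -1 ≤ j) (hj2 : j ≤ (g.length : Int)) :
    pvU (pvDfsA g i j).1 ≤ pvU g ∧ pvSquare (pvDfsA g i j).1 ∧
      (pvDfsA g i j).1.length = g.length := by
  exact (pvDfsF_step (pvU g + 1) g i j hsq (by omega) hi1 hi2 hj1 hj2).2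

lemma pvDfsA_invalid (g : List (List Int)) (i j : Int)
    (h : (i < 0 ∨ i = (g.length : Int) ∨ j < 0 ∨ j = ((g.headD []).length : Int)) ∨
      pvGget g i j = -1) : pvDfsA g i j = (g, 0, 0) := by
  rw [pvDfsA, pvDfsF_succ]
  rcases h with h | h
  · rw [if_pos h]
  · by_cases hg : i < 0 ∨ i = (g.length : Int) ∨ j < 0 ∨ j = ((g.headD []).length : Int)
    · rw [if_pos hg]
    · rw [if_neg hg, if_pos h]

lemma pvChainD (F : Nat) (n : Nat) (i j : Int) :
    ∀ (ds : List (Int × Int)) (g : List (List Int)) (c s : Int), pvSquare g → g.length = n →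
    pvU g < F →
    (∀ d ∈ ds, -1 ≤ i + d.1 ∧ i + d.1 ≤ (n : Int) ∧ -1 ≤ j + d.2 ∧ j + d.2 ≤ (n : Int)) →
    ds.foldl (fun st d => let r := pvDfsF F st.1 (i + d.1) (j + d.2);
        (r.1, st.2.1 + r.2.1, st.2.2 + r.2.2)) (g, c, s)
      = ds.foldl (fun st d => let r := pvDfsA st.1 (i + d.1) (j + d.2);
        (r.1, st.2.1 + r.2.1, st.2.2 + r.2.2)) (g, c, s) := by
  intro ds
  induction ds with
  | nil => intro g c s _ _ _ _; rfl
  | cons d ds ih =>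
    intro g c s hsq hlen hf hds
    have hd := hds d (by simp)
    have he : pvDfsF F g (i + d.1) (j + d.2) = pvDfsA g (i + d.1) (j + d.2) :=
      pvDfsF_eq_dfsA F g (i + d.1) (j + d.2) hsq hf hd.1 (by omega) hd.2.2.1 (by omega)
    have hp := pvDfsA_props g (i + d.1) (j + d.2) hsq hd.1 (by omega) hd.2.2.1 (by omega)
    simp only [List.foldl_cons]
    rw [he]
    exact ih (pvDfsA g (i + d.1) (j + d.2)).1 (c + (pvDfsA g (i + d.1) (j + d.2)).2.1)
      (s + (pvDfsA g (i + d.1) (j + d.2)).2.2) hp.2.1 (by rw [hp.2.2, hlen]) (by omega)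
      (fun e he' => hds e (by simp [he']))

lemma pvDfsA_unfold (g : List (List Int)) (i j : Int) (hsq : pvSquare g)
    (hi : 0 ≤ i ∧ i < (g.length : Int)) (hj : 0 ≤ j ∧ j < (g.length : Int))
    (hv : pvGget g i j ≠ -1) :
    pvDfsA g i j =
      pvDirs.foldl
        (fun st d =>
          let r := pvDfsA st.1 (i + d.1) (j + d.2)
          (r.1, st.2.1 + r.2.1, st.2.2 + r.2.2))
        (pvGset g i j (-1), 1, pvGget g i j) := by
  have h0 : 0 < g.length := by omega
  have hcols : ((g.headD []).length : Int) = (g.length : Int) := pvCols_eq g hsq h0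
  have hng : ¬(i < 0 ∨ i = (g.length : Int) ∨ j < 0 ∨ j = ((g.headD []).length : Int)) := by
    omega
  have hrow : j.toNat < (g.getD i.toNat []).length := by
    rw [pvRow_len g i.toNat hsq (by omega)]; omega
  have hmark := pvU_mark g i j hi.1 (by omega) hj.1 hrow hv
  rw [pvDfsA, pvDfsF_succ, if_neg hng, if_neg hv]
  exact pvChainD (pvU g) g.length i j pvDirs (pvGset g i j (-1)) 1 (pvGget g i j)
    (pvSquare_gset g i j (-1) hsq) (pvGset_length g i j (-1)) (by omega)
    (by
      intro d hd
      simp only [pvDirs, List.mem_cons, List.not_mem_nil, or_false] at hd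
      rcases hd with rfl | rfl | rfl | rfl <;> simp <;> omega)

lemma pvLoopB_nil (g : List (List Int)) (cnt s : Int) : pvLoopB g [] cnt s = (g, cnt, s) := by
  rw [pvLoopB]

lemma pvLoopB_cons_skip (g : List (List Int)) (x y : Int) (rest : List (Int × Int)) (cnt s : Int)
    (h : ¬(0 ≤ x ∧ x < (g.length : Int) ∧ 0 ≤ y ∧ y < (g.length : Int) ∧
      y.toNat < (g.getD x.toNat []).length ∧ pvGget g x y ≠ -1)) :
    pvLoopB g ((x, y) :: rest) cnt s = pvLoopB g rest cnt s := by
  rw [pvLoopB, dif_neg h]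

lemma pvLoopB_cons_go (g : List (List Int)) (x y : Int) (rest : List (Int × Int)) (cnt s : Int)
    (h : 0 ≤ x ∧ x < (g.length : Int) ∧ 0 ≤ y ∧ y < (g.length : Int) ∧
      y.toNat < (g.getD x.toNat []).length ∧ pvGget g x y ≠ -1) :
    pvLoopB g ((x, y) :: rest) cnt s =
      pvLoopB (pvGset g x y (-1)) ((x, y + 1) :: (x + 1, y) :: (x, y - 1) :: (x - 1, y) :: rest)
        (cnt + 1) (s + pvGget g x y) := by
  rw [pvLoopB, dif_pos h]

-- the skip case of the simulation: an out-of-range or marked cell is (0,0) for both programs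
lemma pvSimSkip (g : List (List Int)) (hsq : pvSquare g) (i j : Int) (hi1 : -1 ≤ i)
    (hi2 : i ≤ (g.length : Int)) (hj1 : -1 ≤ j) (hj2 : j ≤ (g.length : Int))
    (rest : List (Int × Int)) (cnt s : Int)
    (hval : ¬(0 ≤ i ∧ i < (g.length : Int) ∧ 0 ≤ j ∧ j < (g.length : Int) ∧
      j.toNat < (g.getD i.toNat []).length ∧ pvGget g i j ≠ -1)) :
    pvLoopB g ((i, j) :: rest) cnt s =
      pvLoopB (pvDfsA g i j).1 rest (cnt + (pvDfsA g i j).2.1) (s + (pvDfsA g i j).2.2) := by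
  have hinv : pvDfsA g i j = (g, 0, 0) := by
    apply pvDfsA_invalid
    by_cases hb : 0 ≤ i ∧ i < (g.length : Int) ∧ 0 ≤ j ∧ j < (g.length : Int)
    · have h0 : 0 < g.length := by omega
      have hcols : ((g.headD []).length : Int) = (g.length : Int) := pvCols_eq g hsq h0
      have hrow : j.toNat < (g.getD i.toNat []).length := by
        rw [pvRow_len g i.toNat hsq (by omega)]; omega
      right
      by_contra hm
      exact hval ⟨hb.1, hb.2.1, hb.2.2.1, hb.2.2.2, hrow, hm⟩
    · left
      by_cases h0 : 0 < g.length
      · have hcols : ((g.headD []).length : Int) = (g.length : Int) := pvCols_eq g hsq h0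
        omega
      · omega
    -- done
  rw [pvLoopB_cons_skip g i j rest cnt s hval, hinv]
  simp

-- the simulation: popping one cell from B's stack computes exactly A's dfs from that cell
lemma pvSim : ∀ (u : Nat) (g : List (List Int)), pvU g ≤ u → pvSquare g →
    ∀ (i j : Int), -1 ≤ i → i ≤ (g.length : Int) → -1 ≤ j → j ≤ (g.length : Int) →
    ∀ (rest : List (Int × Int)) (cnt s : Int),
    pvLoopB g ((i, j) :: rest) cnt s =
      pvLoopB (pvDfsA g i j).1 rest (cnt + (pvDfsA g i j).2.1) (s + (pvDfsA g i j).2.2) := by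
  intro u
  induction u with
  | zero =>
    intro g hu hsq i j hi1 hi2 hj1 hj2 rest cnt s
    by_cases hval : 0 ≤ i ∧ i < (g.length : Int) ∧ 0 ≤ j ∧ j < (g.length : Int) ∧
        j.toNat < (g.getD i.toNat []).length ∧ pvGget g i j ≠ -1
    · have := pvU_ge1 g i j hval.1 (by omega) hval.2.2.1 hval.2.2.2.2.1 hval.2.2.2.2.2
      omega
    · exact pvSimSkip g hsq i j hi1 hi2 hj1 hj2 rest cnt s hval
  | succ u ih =>
    intro g hu hsq i j hi1 hi2 hj1 hj2 rest cnt s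
    by_cases hval : 0 ≤ i ∧ i < (g.length : Int) ∧ 0 ≤ j ∧ j < (g.length : Int) ∧
        j.toNat < (g.getD i.toNat []).length ∧ pvGget g i j ≠ -1
    · have hv : pvGget g i j ≠ -1 := hval.2.2.2.2.2
      have hmark := pvU_mark g i j hval.1 (by omega) hval.2.2.1 hval.2.2.2.2.1 hv
      have hsq1 : pvSquare (pvGset g i j (-1)) := pvSquare_gset g i j (-1) hsq
      have hlen1 : (pvGset g i j (-1)).length = g.length := pvGset_length g i j (-1)
      rw [pvLoopB_cons_go g i j rest cnt s hval]
      -- step 1: (i, j+1)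
      have h1 := ih (pvGset g i j (-1)) (by omega) hsq1 i (j + 1) (by omega)
        (by omega) (by omega) (by omega)
      rw [h1]
      have p1 := pvDfsA_props (pvGset g i j (-1)) i (j + 1) hsq1 (by omega) (by omega)
        (by omega) (by omega)
      set g1 := (pvDfsA (pvGset g i j (-1)) i (j + 1)).1 with hg1
      -- step 2: (i+1, j)
      have h2 := ih g1 (by omega) p1.2.1 (i + 1) j (by omega)
        (by rw [p1.2.2, hlen1]; omega) (by omega) (by rw [p1.2.2, hlen1]; omega)
      rw [h2]
      have p2 := pvDfsA_props g1 (i + 1) j p1.2.1 (by omega)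
        (by rw [p1.2.2, hlen1]; omega) (by omega) (by rw [p1.2.2, hlen1]; omega)
      set g2 := (pvDfsA g1 (i + 1) j).1 with hg2
      -- step 3: (i, j-1)
      have h3 := ih g2 (by omega) p2.2.1 i (j - 1) (by omega)
        (by rw [p2.2.2, p1.2.2, hlen1]; omega) (by omega)
        (by rw [p2.2.2, p1.2.2, hlen1]; omega)
      rw [h3]
      have p3 := pvDfsA_props g2 i (j - 1) p2.2.1 (by omega)
        (by rw [p2.2.2, p1.2.2, hlen1]; omega) (by omega)
        (by rw [p2.2.2, p1.2.2, hlen1]; omega)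
      set g3 := (pvDfsA g2 i (j - 1)).1 with hg3
      -- step 4: (i-1, j)
      have h4 := ih g3 (by omega) p3.2.1 (i - 1) j (by omega)
        (by rw [p3.2.2, p2.2.2, p1.2.2, hlen1]; omega) (by omega)
        (by rw [p3.2.2, p2.2.2, p1.2.2, hlen1]; omega)
      rw [h4]
      -- now fold out A's dfs on the right
      rw [pvDfsA_unfold g i j hsq ⟨hval.1, hval.2.1⟩ ⟨hval.2.2.1, hval.2.2.2.1⟩ hv]
      simp only [pvDirs, List.foldl_cons, List.foldl_nil, add_zero, ← sub_eq_add_neg]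
      rw [← hg1, ← hg2, ← hg3]
      congr 1
      · omega
      · omega
    · exact pvSimSkip g hsq i j hi1 hi2 hj1 hj2 rest cnt s hval

lemma pvSeed (g : List (List Int)) (i j : Int) (hsq : pvSquare g) (hi1 : -1 ≤ i)
    (hi2 : i ≤ (g.length : Int)) (hj1 : -1 ≤ j) (hj2 : j ≤ (g.length : Int)) :
    pvLoopB g [(i, j)] 0 0 = pvDfsA g i j := by
  rw [pvSim (pvU g) g (le_refl _) hsq i j hi1 hi2 hj1 hj2 [] 0 0, pvLoopB_nil]
  simp

lemma pvSumm_eq (grid : List (List Int)) :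
    (grid.flatMap (fun row => row.map (fun cell => max 0 cell))).sum =
      (grid.map (fun row => (row.map (fun v => max 0 v)).sum)).sum := by
  induction grid with
  | nil => rfl
  | cons r t ih => simp [List.flatMap_cons, List.sum_append, ih]

lemma pvFoldInv {σ α : Type} (P : σ → Prop) (fA fB : σ → α → σ) (l : List α)
    (h : ∀ st a, a ∈ l → P st → fA st a = fB st a ∧ P (fA st a)) :
    ∀ st, P st → l.foldl fA st = l.foldl fB st ∧ P (l.foldl fA st) := by
  induction l with
  | nil => intro st hP; exact ⟨rfl, hP⟩
  | cons a t ih =>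
    intro st hP
    have h1 := h st a (by simp) hP
    simp only [List.foldl_cons]
    rw [← h1.1]
    exact ih (fun st b hb hP' => h st b (by simp [hb]) hP') (fA st a) h1.2

lemma pvMemRangeInt {n : Nat} {x : Int}
    (h : x ∈ (List.range n >>= (fun a => pure ((a : Int))))) : 0 ≤ x ∧ x < (n : Int) := by
  simp only [List.bind_eq_flatMap, List.mem_flatMap, List.mem_range] at h
  obtain ⟨a, ha, hx⟩ := h
  simp only [List.pure_def, List.mem_singleton] at hx
  subst hx
  omega

lemma pvMain (grid : List (List Int)) (hpre : Pre_sumRemoteness grid) :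
    sumRemoteness grid = sumRemoteness_alt grid := by
  have hstep : ∀ (st : List (List Int) × Int) (i : Int), i ∈ (List.range grid.length >>= (fun a => pure ((a : Int)))) →
      (pvSquare st.1 ∧ st.1.length = grid.length) →
      ((List.range grid.length >>= (fun a => pure ((a : Int)))).foldl
        (fun (st : List (List Int) × Int) (j : Int) =>
          if pvGget st.1 i j > 0 then
            ((pvDfsA st.1 i j).1,
              st.2 + ((grid.flatMap (fun row => row.map (fun cell => max 0 cell))).sum
                - (pvDfsA st.1 i j).2.2) * (pvDfsA st.1 i j).2.1)
          else st) st
       = (List.range grid.length >>= (fun a => pure ((a : Int)))).foldl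
        (fun (st : List (List Int) × Int) (j : Int) =>
          if pvGget st.1 i j > 0 then
            ((pvLoopB st.1 [(i, j)] 0 0).1,
              st.2 + ((grid.flatMap (fun row => row.map (fun cell => max 0 cell))).sum
                - (pvLoopB st.1 [(i, j)] 0 0).2.2)
                  * (pvLoopB st.1 [(i, j)] 0 0).2.1)
          else st) st)
      ∧ (pvSquare ((List.range grid.length >>= (fun a => pure ((a : Int)))).foldl
        (fun (st : List (List Int) × Int) (j : Int) =>
          if pvGget st.1 i j > 0 then
            ((pvDfsA st.1 i j).1,
              st.2 + ((grid.flatMap (fun row => row.map (fun cell => max 0 cell))).sum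
                - (pvDfsA st.1 i j).2.2) * (pvDfsA st.1 i j).2.1)
          else st) st).1
        ∧ ((List.range grid.length >>= (fun a => pure ((a : Int)))).foldl
        (fun (st : List (List Int) × Int) (j : Int) =>
          if pvGget st.1 i j > 0 then
            ((pvDfsA st.1 i j).1,
              st.2 + ((grid.flatMap (fun row => row.map (fun cell => max 0 cell))).sum
                - (pvDfsA st.1 i j).2.2) * (pvDfsA st.1 i j).2.1)
          else st) st).1.length = grid.length) := by
    intro st i hi hP
    have hi' := pvMemRangeInt hi
    refine pvFoldInv (fun st => pvSquare st.1 ∧ st.1.length = grid.length)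
      (fun (st : List (List Int) × Int) (j : Int) =>
          if pvGget st.1 i j > 0 then
            ((pvDfsA st.1 i j).1,
              st.2 + ((grid.flatMap (fun row => row.map (fun cell => max 0 cell))).sum
                - (pvDfsA st.1 i j).2.2) * (pvDfsA st.1 i j).2.1)
          else st)
      (fun (st : List (List Int) × Int) (j : Int) =>
          if pvGget st.1 i j > 0 then
            ((pvLoopB st.1 [(i, j)] 0 0).1,
              st.2 + ((grid.flatMap (fun row => row.map (fun cell => max 0 cell))).sum
                - (pvLoopB st.1 [(i, j)] 0 0).2.2)
                  * (pvLoopB st.1 [(i, j)] 0 0).2.1)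
          else st)
      (List.range grid.length >>= (fun a => pure ((a : Int)))) ?_ st hP
    intro st2 j hj hP2
    beta_reduce
    have hj' := pvMemRangeInt hj
    by_cases hc : pvGget st2.1 i j > 0
    · have hseed := pvSeed st2.1 i j hP2.1 (by omega)
        (by rw [hP2.2]; omega) (by omega) (by rw [hP2.2]; omega)
      have hprops := pvDfsA_props st2.1 i j hP2.1 (by omega)
        (by rw [hP2.2]; omega) (by omega) (by rw [hP2.2]; omega)
      rw [if_pos hc, if_pos hc, hseed]
      exact ⟨rfl, hprops.2.1, by rw [hprops.2.2, hP2.2]⟩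
    · rw [if_neg hc, if_neg hc]
      exact ⟨rfl, hP2⟩
  have hout := pvFoldInv (fun st => pvSquare st.1 ∧ st.1.length = grid.length)
    (fun (st : List (List Int) × Int) (i : Int) => (List.range grid.length >>= (fun a => pure ((a : Int)))).foldl
        (fun (st : List (List Int) × Int) (j : Int) =>
          if pvGget st.1 i j > 0 then
            ((pvDfsA st.1 i j).1,
              st.2 + ((grid.flatMap (fun row => row.map (fun cell => max 0 cell))).sum
                - (pvDfsA st.1 i j).2.2) * (pvDfsA st.1 i j).2.1)
          else st) st)
    (fun (st : List (List Int) × Int) (i : Int) => (List.range grid.length >>= (fun a => pure ((a : Int)))).foldl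
        (fun (st : List (List Int) × Int) (j : Int) =>
          if pvGget st.1 i j > 0 then
            ((pvLoopB st.1 [(i, j)] 0 0).1,
              st.2 + ((grid.flatMap (fun row => row.map (fun cell => max 0 cell))).sum
                - (pvLoopB st.1 [(i, j)] 0 0).2.2)
                  * (pvLoopB st.1 [(i, j)] 0 0).2.1)
          else st) st)
    (List.range grid.length >>= (fun a => pure ((a : Int)))) hstep (grid, 0)
    (⟨hpre, rfl⟩ : pvSquare grid ∧ grid.length = grid.length)
  have hgoal : ((List.range grid.length >>= (fun a => pure ((a : Int)))).foldl
      (fun (st : List (List Int) × Int) (i : Int) => (List.range grid.length >>= (fun a => pure ((a : Int)))).foldl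
        (fun (st : List (List Int) × Int) (j : Int) =>
          if pvGget st.1 i j > 0 then
            ((pvDfsA st.1 i j).1,
              st.2 + ((grid.flatMap (fun row => row.map (fun cell => max 0 cell))).sum
                - (pvDfsA st.1 i j).2.2) * (pvDfsA st.1 i j).2.1)
          else st) st) (grid, 0)).2
    = ((List.range grid.length >>= (fun a => pure ((a : Int)))).foldl
      (fun (st : List (List Int) × Int) (i : Int) => (List.range grid.length >>= (fun a => pure ((a : Int)))).foldl
        (fun (st : List (List Int) × Int) (j : Int) =>
          if pvGget st.1 i j > 0 then
            ((pvLoopB st.1 [(i, j)] 0 0).1,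
              st.2 + ((grid.map (fun row => (row.map (fun v => max 0 v)).sum)).sum
                - (pvLoopB st.1 [(i, j)] 0 0).2.2)
                  * (pvLoopB st.1 [(i, j)] 0 0).2.1)
          else st) st) (grid, 0)).2 := by
    simp only [← pvSumm_eq grid]
    exact congrArg Prod.snd hout.1
  exact hgoal

-- ===== VERDICT (by name: the statement is the Claim_ definition above) =====
theorem sumRemoteness_spec : Claim_equal_sumRemoteness := by
  intro grid _ hpre
  exact pvMain grid hpre
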